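-- pv_equiv track=rewrite | github.com/profam-paper/profam-2026 | data_creation_scripts/create_ted_text_min_20_max_90.py | _remap_ids_preserve_order
-- ===== SOURCE A (Python) =====
-- from typing import Dict, Iterable, List, Tuple, Optional, Set
--
-- def _remap_ids_preserve_order(ids: Iterable) -> Dict:
--     """Map arbitrary ids to contiguous integers in first-seen order."""
--     mapping: Dict = {}
--     next_id = 0
--     for x in ids:
--         if x not in mapping:
--             mapping[x] = next_id
--             next_id += 1
--     return mapping
-- ===== SOURCE B (Python) =====
-- def _remap_ids_preserve_order(ids):
--     """Map arbitrary ids to contiguous integers in first-seen order."""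
--     first = {}
--     for pos, x in reversed(list(enumerate(ids))):
--         first[x] = pos              # last write wins == earliest position
--     order = sorted(first, key=first.get)
--     return dict(zip(order, range(len(order))))
-- ===== Notes on version B (the rewrite author's own statement) =====
-- stated objective: alternative
-- what changed: Instead of A's single pass with a membership branch and a manual counter, B records each id's first-occurrence position by an unconditional overwrite loop over the reversed enumeration, sorts the keys by that position to recover first-seen order, and zips them with range to form the mapping.
import Mathlib
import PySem

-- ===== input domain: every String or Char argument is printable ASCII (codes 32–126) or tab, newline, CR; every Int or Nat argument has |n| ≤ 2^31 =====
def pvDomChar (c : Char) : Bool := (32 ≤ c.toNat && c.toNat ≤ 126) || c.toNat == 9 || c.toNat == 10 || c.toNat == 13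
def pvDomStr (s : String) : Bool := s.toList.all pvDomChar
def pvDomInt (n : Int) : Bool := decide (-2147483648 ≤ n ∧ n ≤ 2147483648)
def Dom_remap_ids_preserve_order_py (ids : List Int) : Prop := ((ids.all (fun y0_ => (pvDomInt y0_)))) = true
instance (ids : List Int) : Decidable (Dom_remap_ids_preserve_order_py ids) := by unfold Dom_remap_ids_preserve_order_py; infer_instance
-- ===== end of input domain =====

-- B replaces A's one-pass membership-branch/counter loop by: record each id's first-occurrence position
-- with an unconditional overwrite loop over the reversed enumeration, sort the keys by that position to
-- recover first-seen order, and zip with range — a sort-based alternative of similar cost.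

-- ===== PORT A =====
-- literal port: dict `mapping`, counter `next_id`, one loop with a membership branch
def remap_ids_preserve_order_py (ids : List Int) : List (Int × Int) :=
  (ids.foldl
    (fun (s : PySem.Dict Int Int × Int) x =>
      if s.1.contains x then s else (s.1.insert x s.2, s.2 + 1))
    ((PySem.Dict.empty : PySem.Dict Int Int), (0 : Int))).1.items

-- ===== PORT B =====
-- literal port of Source B: first = {}; for pos, x in reversed(list(enumerate(ids))): first[x] = pos;
-- order = sorted(first, key=first.get); dict(zip(order, range(len(order))))
-- first.get as sort key is ported as the total getD x 0: exact, since sorted only applies the key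
-- to keys of `first`, where get returns the stored value.
def remap_ids_preserve_order_py_alt (ids : List Int) : List (Int × Int) :=
  let first := ((PySem.List.enumerate ids 0).reverse).foldl
      (fun (d : PySem.Dict Int Int) p => d.insert p.2 p.1) PySem.Dict.empty
  let order := PySem.List.sorted first.keys (fun x => first.getD x 0)
  (PySem.Dict.ofList (order.zip (PySem.List.pyRange 0 (order.length : Int) 1))).items

-- ===== PRECONDITION & SPEC =====
def Spec_remap_ids_preserve_order_py (ids : List Int) (out : List (Int × Int)) : Prop := out = remap_ids_preserve_order_py_alt ids
instance (ids : List Int) (out : List (Int × Int)) : Decidable (Spec_remap_ids_preserve_order_py ids out) := by unfold Spec_remap_ids_preserve_order_py; infer_instance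

-- ===== CLAIM (what is proved, stated in full; the proofs are below) =====
def Claim_equal_remap_ids_preserve_order_py : Prop := ∀ (ids : List Int), Dom_remap_ids_preserve_order_py ids → Spec_remap_ids_preserve_order_py ids (remap_ids_preserve_order_py ids)

-- ===== LEMMAS AND PROOFS =====

-- Invariant for A's loop: if the dict's items enumerate its keys and the counter is its size,
-- the loop extends the items to enumerate `Set.update d.keys ids`.
theorem remapA_inv (ids : List Int) : ∀ (d : PySem.Dict Int Int),
    d.keys.Nodup →
    d.items = (PySem.List.enumerate d.keys 0).map (fun p => (p.2, p.1)) →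
    (ids.foldl
      (fun (s : PySem.Dict Int Int × Int) x =>
        if s.1.contains x then s else (s.1.insert x s.2, s.2 + 1))
      (d, (d.size : Int))).1.items
      = (PySem.List.enumerate (PySem.Set.update d.keys ids) 0).map (fun p => (p.2, p.1)) := by
  induction ids with
  | nil => intro d hnd hit; simpa [PySem.Set.update_nil] using hit
  | cons x xs ih =>
    intro d hnd hit
    by_cases hc : d.contains x = true
    · have hmem : x ∈ d.keys := (PySem.Dict.contains_iff_mem_keys d x).mp hc
      simp only [List.foldl_cons, hc, if_true]
      rw [PySem.Set.update_cons, PySem.Set.add_of_mem hmem]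
      exact ih d hnd hit
    · have hc' : d.contains x = false := by simpa using hc
      have hnmem : x ∉ d.keys := fun h => by
        simp [(PySem.Dict.contains_iff_mem_keys d x).mpr h] at hc'
      have hlen : d.keys.length = d.size := by
        simp [PySem.Dict.keys, PySem.Dict.size]
      have hkeys' : (d.insert x (d.size : Int)).keys = d.keys ++ [x] :=
        PySem.Dict.keys_insert_of_not_contains d ((d.size : Int)) hc'
      have hitems' : (d.insert x (d.size : Int)).items = d.items ++ [(x, (d.size : Int))] :=
        PySem.Dict.items_insert_of_not_contains d ((d.size : Int)) hc'
      have hsize' : (d.insert x (d.size : Int)).size = d.size + 1 := by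
        rw [show (d.insert x (d.size : Int)).size
              = (d.insert x (d.size : Int)).items.length from rfl, hitems']
        simp [PySem.Dict.size]
      have hinv' : (d.insert x (d.size : Int)).items
          = (PySem.List.enumerate (d.insert x (d.size : Int)).keys 0).map (fun p => (p.2, p.1)) := by
        rw [hitems', hkeys', PySem.List.enumerate_append, hit]
        simp [PySem.List.enumerate_cons, hlen]
      have := ih (d.insert x (d.size : Int))
        (by rw [hkeys']; exact List.Nodup.append hnd (List.nodup_singleton x)
              (by simpa using hnmem))
        hinv'
      simp only [List.foldl_cons, hc']
      rw [PySem.Set.update_cons, PySem.Set.add_of_not_mem hnmem, ← hkeys']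
      have hcast : ((d.size : Int) + 1) = ((d.insert x (d.size : Int)).size : Int) := by
        rw [hsize']; push_cast; ring
      rw [hcast]
      exact this

-- proof-side name for B's first loop (the dict of first-occurrence positions)
def firstDict (ids : List Int) : PySem.Dict Int Int :=
  ((PySem.List.enumerate ids 0).reverse).foldl
    (fun (d : PySem.Dict Int Int) p => d.insert p.2 p.1) PySem.Dict.empty

-- first-occurrence position as a function of the input list
def posKey (ids : List Int) (x : Int) : Int := (((PySem.List.index? ids x).getD 0 : Nat) : Int)

-- set(ids) in first-occurrence order is strictly increasing in first-occurrence position.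
theorem ofList_pairwise_index (ids : List Int) :
    (PySem.Set.ofList ids).Pairwise (fun a b => posKey ids a < posKey ids b) := by
  unfold posKey
  induction ids using List.reverseRecOn with
  | nil => simp [PySem.Set.ofList, PySem.Set.empty]
  | append_singleton xs x ih =>
    have hof : PySem.Set.ofList (xs ++ [x]) = PySem.Set.add (PySem.Set.ofList xs) x := by
      simp [PySem.Set.ofList, List.foldl_append]
    rw [hof]
    by_cases hx : x ∈ PySem.Set.ofList xs
    · rw [PySem.Set.add_of_mem hx]
      refine ih.imp_of_mem ?_
      intro a b ha hb h
      have ha' : a ∈ xs := (PySem.Set.mem_ofList xs a).mp ha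
      have hb' : b ∈ xs := (PySem.Set.mem_ofList xs b).mp hb
      rw [PySem.List.index?_append_of_mem [x] ha', PySem.List.index?_append_of_mem [x] hb']
      exact h
    · rw [PySem.Set.add_of_not_mem hx]
      have hx' : x ∉ xs := fun h => hx ((PySem.Set.mem_ofList xs x).mpr h)
      rw [List.pairwise_append]
      refine ⟨ih.imp_of_mem ?_, List.pairwise_singleton _ x, ?_⟩
      · intro a b ha hb h
        have ha' : a ∈ xs := (PySem.Set.mem_ofList xs a).mp ha
        have hb' : b ∈ xs := (PySem.Set.mem_ofList xs b).mp hb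
        rw [PySem.List.index?_append_of_mem [x] ha', PySem.List.index?_append_of_mem [x] hb']
        exact h
      · intro a ha b hb
        have ha' : a ∈ xs := (PySem.Set.mem_ofList xs a).mp ha
        rw [List.mem_singleton] at hb; rw [hb]
        rw [PySem.List.index?_append_of_mem [x] ha',
            PySem.List.index?_append_singleton_self xs x hx']
        obtain ⟨k, hk⟩ := Option.isSome_iff_exists.mp
          ((PySem.List.index?_isSome_iff xs a).mpr ha')
        obtain ⟨pre, suf, hxs, hlen, -⟩ := (PySem.List.index?_eq_some_iff xs a k).mp hk
        have : k < xs.length := by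
          subst hxs; rw [← hlen]; simp
        rw [hk]
        simp only [Option.getD_some]
        omega

-- lookup in an insert-fold keyed by the pair's second component: the LAST pair wins.
theorem get?_foldl_insert_snd_fst (l : List (Int × Int)) :
    ∀ (d : PySem.Dict Int Int) (k : Int),
    (l.foldl (fun (d : PySem.Dict Int Int) p => d.insert p.2 p.1) d).get? k
      = match l.reverse.find? (fun p => p.2 == k) with
        | some p => some p.1
        | none => d.get? k := by
  induction l using List.reverseRecOn with
  | nil => intro d k; simp
  | append_singleton xs p ih =>
    intro d k
    rw [List.foldl_append, List.reverse_append]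
    by_cases hpk : p.2 = k
    · subst hpk
      simp [PySem.Dict.get?_insert_self]
    · rw [List.foldl_cons, List.foldl_nil]
      have hne : k ≠ p.2 := fun h => hpk h.symm
      rw [PySem.Dict.get?_insert_of_ne _ _ hne, ih d k]
      simp [beq_iff_eq, hpk]

-- the first pair of enumerate(ids, s) whose value is x carries the first-occurrence index.
theorem find?_enumerate (ids : List Int) (x : Int) (hx : x ∈ ids) : ∀ (s : Int),
    (PySem.List.enumerate ids s).find? (fun p => p.2 == x)
      = some (s + posKey ids x, x) := by
  induction ids with
  | nil => cases hx
  | cons y t ih =>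
    intro s
    rw [PySem.List.enumerate_cons]
    by_cases hyx : y = x
    · subst hyx
      unfold posKey
      rw [PySem.List.index?_cons_self]
      simp
    · have hxt : x ∈ t := by
        rcases List.mem_cons.mp hx with h | h
        · exact absurd h.symm hyx
        · exact h
      have hstep : List.find? (fun (p : Int × Int) => p.2 == x)
            ((s, y) :: PySem.List.enumerate t (s + 1))
          = List.find? (fun (p : Int × Int) => p.2 == x) (PySem.List.enumerate t (s + 1)) := by
        simp [hyx]
      rw [hstep, ih hxt (s + 1)]
      obtain ⟨k, hk⟩ := Option.isSome_iff_exists.mp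
        ((PySem.List.index?_isSome_iff t x).mpr hxt)
      have hcons := PySem.List.index?_cons_of_ne t hyx
      unfold posKey
      rw [hcons, hk]
      simp only [Option.map_some, Option.getD_some]
      congr 1
      push_cast; ring

-- on members of ids, B's sort key (first.get) IS the first-occurrence position.
theorem getD_firstDict (ids : List Int) (x : Int) (hx : x ∈ ids) :
    (firstDict ids).getD x 0 = posKey ids x := by
  rw [PySem.Dict.getD_eq_get?_getD]
  unfold firstDict
  rw [get?_foldl_insert_snd_fst, List.reverse_reverse, find?_enumerate ids x hx 0]
  simp

-- the keys of B's first loop are set(ids.reverse).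
theorem keys_firstDict (ids : List Int) :
    (firstDict ids).keys = PySem.Set.ofList ids.reverse := by
  have h2 : PySem.Set.update (PySem.Dict.empty : PySem.Dict Int Int).keys
      (((PySem.List.enumerate ids 0).reverse).map (fun p => p.2))
      = PySem.Set.ofList ids.reverse := by
    rw [PySem.Dict.keys_empty, PySem.Set.update_nil_left]
    congr 1
    rw [List.map_reverse, PySem.List.map_snd_enumerate]
  exact (PySem.Dict.keys_foldl_insert_key ((PySem.List.enumerate ids 0).reverse)
    (fun p => p.2) (fun _ p => p.1) PySem.Dict.empty).trans h2

-- sorting first's keys by first-occurrence position recovers first-seen order: set(ids).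
theorem sorted_firstDict (ids : List Int) :
    PySem.List.sorted (firstDict ids).keys (fun x => (firstDict ids).getD x 0)
      = PySem.Set.ofList ids := by
  apply PySem.List.sorted_eq_of_perm_of_pairwise_lt
  · rw [keys_firstDict]
    rw [List.perm_ext_iff_of_nodup (PySem.Set.nodup_ofList ids) (PySem.Set.nodup_ofList ids.reverse)]
    intro a
    rw [PySem.Set.mem_ofList, PySem.Set.mem_ofList, List.mem_reverse]
  · refine (ofList_pairwise_index ids).imp_of_mem ?_
    intro a b ha hb h
    rw [getD_firstDict ids a ((PySem.Set.mem_ofList ids a).mp ha),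
        getD_firstDict ids b ((PySem.Set.mem_ofList ids b).mp hb)]
    exact h

-- enumerate-then-swap is zip-with-range.
theorem enum_swap (l : List Int) : ∀ (s : Int),
    (PySem.List.enumerate l s).map (fun p => (p.2, p.1))
      = l.zip (PySem.List.pyRange s (s + l.length) 1) := by
  induction l with
  | nil => intro s; simp [PySem.List.enumerate_nil, PySem.List.pyRange_one_eq_nil]
  | cons a t ih =>
    intro s
    have hlen : s + ((a :: t).length : Int) = (s + 1) + (t.length : Int) := by
      push_cast [List.length_cons]; omega
    rw [hlen, PySem.List.pyRange_one_cons (by omega), PySem.List.enumerate_cons]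
    simp only [List.map_cons, List.zip_cons_cons]
    rw [ih (s + 1)]

-- B's result computed out: set(ids) zipped with 0..len-1.
theorem remapB_items (ids : List Int) :
    remap_ids_preserve_order_py_alt ids
      = (PySem.Set.ofList ids).zip
          (PySem.List.pyRange 0 ((PySem.Set.ofList ids).length : Int) 1) := by
  have hdef : remap_ids_preserve_order_py_alt ids
      = (PySem.Dict.ofList
          ((PySem.List.sorted (firstDict ids).keys (fun x => (firstDict ids).getD x 0)).zip
            (PySem.List.pyRange 0
              (((PySem.List.sorted (firstDict ids).keys
                  (fun x => (firstDict ids).getD x 0)).length : Int)) 1))).items := rfl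
  rw [hdef, sorted_firstDict]
  have hlenr : (PySem.List.pyRange 0 ((PySem.Set.ofList ids).length : Int) 1).length
      = (PySem.Set.ofList ids).length := by
    rw [PySem.List.length_pyRange_one]; simp
  have hfst : ((PySem.Set.ofList ids).zip
      (PySem.List.pyRange 0 ((PySem.Set.ofList ids).length : Int) 1)).map Prod.fst
      = PySem.Set.ofList ids := List.map_fst_zip (by rw [hlenr])
  have h := PySem.Dict.items_foldl_insert_fresh
    (l := (PySem.Set.ofList ids).zip
      (PySem.List.pyRange 0 ((PySem.Set.ofList ids).length : Int) 1))
    (k := Prod.fst) (v := Prod.snd)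
    (d := (PySem.Dict.empty : PySem.Dict Int Int))
    (by intro a _; simp [PySem.Dict.contains_empty])
    (by rw [hfst]; exact PySem.Set.nodup_ofList ids)
  simpa [PySem.Dict.ofList, PySem.Dict.update] using h

-- ===== VERDICT (by name: the statement is the Claim_ definition above) =====
theorem remap_ids_preserve_order_py_spec : Claim_equal_remap_ids_preserve_order_py := by
  intro ids _
  unfold Spec_remap_ids_preserve_order_py remap_ids_preserve_order_py
  have hA := remapA_inv ids PySem.Dict.empty (by simp)
    (by rfl)
  have h0 : ((PySem.Dict.empty : PySem.Dict Int Int).size : Int) = 0 := by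
    simp [PySem.Dict.size_empty]
  rw [← h0, hA, remapB_items]
  rw [show PySem.Set.update (PySem.Dict.empty : PySem.Dict Int Int).keys ids
        = PySem.Set.ofList ids by simp [PySem.Dict.keys_empty, PySem.Set.update_nil_left]]
  rw [enum_swap]
  simp
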